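-- pv_equiv track=rewrite | github.com/HyperDusXDeveloper/CSBU_Y2 | CE311 Datastucture/Week 4/test.py | CollectLowerCaseCharacters
-- ===== SOURCE A (Python) =====
-- def CollectLowerCaseCharacters(data,row,col):
--     if row >= len(data):
--         return []
--
--     if col >= len(data[row]):
--         return CollectLowerCaseCharacters(data, row + 1, 0)
--
--     if data[row][col].islower():
--         return [data[row][col]] + CollectLowerCaseCharacters(data, row, col + 1)
--
--     return CollectLowerCaseCharacters(data, row, col + 1)
-- ===== SOURCE B (Python) =====
-- def CollectLowerCaseCharacters(data, row, col):
--     return [data[r][c]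
--             for r in range(row, len(data))
--             for c in range(col if r == row else 0, len(data[r]))
--             if data[r][c].islower()]
-- ===== Notes on version B (the rewrite author's own statement) =====
-- stated objective: idiomatic
-- what changed: Replaces A's cell-by-cell recursion (three recursive calls, cursor state carried in the parameters, result built by repeated list concatenation) with a single flat list comprehension over the row range and per-row column ranges, keeping the col offset only on the first row.
import Mathlib
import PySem

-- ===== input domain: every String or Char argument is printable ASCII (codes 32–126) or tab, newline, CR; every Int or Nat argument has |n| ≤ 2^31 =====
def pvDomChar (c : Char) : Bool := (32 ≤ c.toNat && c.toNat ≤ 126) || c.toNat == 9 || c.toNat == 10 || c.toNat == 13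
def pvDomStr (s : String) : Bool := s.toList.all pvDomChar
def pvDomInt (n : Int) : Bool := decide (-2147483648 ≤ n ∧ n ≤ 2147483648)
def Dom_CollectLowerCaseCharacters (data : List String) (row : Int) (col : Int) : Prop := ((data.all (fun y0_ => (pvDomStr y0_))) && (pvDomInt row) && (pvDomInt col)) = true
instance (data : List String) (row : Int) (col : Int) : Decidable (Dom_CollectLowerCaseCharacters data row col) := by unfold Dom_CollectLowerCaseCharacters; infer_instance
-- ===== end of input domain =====

-- B replaces A's cell-by-cell recursion by a single flat comprehension over row/column ranges (idiomatic; same cost).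
-- ===== PORT A =====
-- Port of A: the original cell-by-cell recursion; `none` results of pyGet? are where Python raises IndexError (excluded by Pre_).
def CollectLowerCaseCharacters (data : List String) (row : Int) (col : Int) : List String :=
  if (data.length : Int) ≤ row then []
  else
    match _hrow : PySem.List.pyGet? data row with
    | none => []  -- Python: IndexError on data[row]; outside Pre_
    | some s =>
      if PySem.Str.len s ≤ col then
        CollectLowerCaseCharacters data (row + 1) 0
      else
        match PySem.Str.pyGet? s col with
        | none => []  -- Python: IndexError on data[row][col]; outside Pre_
        | some ch =>
          if PySem.Chars.islower ch then
            String.ofList [ch] :: CollectLowerCaseCharacters data row (col + 1)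
          else
            CollectLowerCaseCharacters data row (col + 1)
termination_by ((((data.length : Int) - row).toNat, (PySem.Str.len ((PySem.List.pyGet? data row).getD "") - col).toNat) : Nat × Nat)
decreasing_by
  · apply Prod.Lex.left; omega
  · simp only [_hrow, Option.getD_some]
    apply Prod.Lex.right; omega

-- ===== PORT B =====
-- Port of B: one flat comprehension over the row range and the per-row column range (col offset only on the first row).
def pvInner (s : String) (start : Int) : List String :=
  (PySem.List.pyRange start (PySem.Str.len s)).filterMap (fun c =>
    match PySem.Str.pyGet? s c with
    | some ch => if PySem.Chars.islower ch then some (String.ofList [ch]) else none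
    | none => none)

def CollectLowerCaseCharacters_alt (data : List String) (row : Int) (col : Int) : List String :=
  (PySem.List.pyRange row (data.length : Int)).flatMap (fun r =>
    pvInner ((PySem.List.pyGet? data r).getD "") (if r = row then col else 0))

-- ===== PRECONDITION & SPEC =====
-- Pre_ excludes exactly the inputs where A raises IndexError: a row index below -len(data) (with row < len(data)),
-- or a first-row column index below -len(data[row]).
def Pre_CollectLowerCaseCharacters (data : List String) (row : Int) (col : Int) : Prop :=
  (data.length : Int) ≤ row ∨
    ((PySem.List.pyGet? data row).isSome = true ∧
      -(PySem.Str.len ((PySem.List.pyGet? data row).getD "")) ≤ col)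
instance (data : List String) (row : Int) (col : Int) : Decidable (Pre_CollectLowerCaseCharacters data row col) := by
  unfold Pre_CollectLowerCaseCharacters; infer_instance

def pvWitness_CollectLowerCaseCharacters : List String × Int × Int := (["aB c", "xyz"], 0, 0)

def Spec_CollectLowerCaseCharacters (data : List String) (row : Int) (col : Int) (out : List String) : Prop := out = CollectLowerCaseCharacters_alt data row col
instance (data : List String) (row : Int) (col : Int) (out : List String) : Decidable (Spec_CollectLowerCaseCharacters data row col out) := by unfold Spec_CollectLowerCaseCharacters; infer_instance

-- ===== CLAIM (what is proved, stated in full; the proofs are below) =====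
def Claim_equal_CollectLowerCaseCharacters : Prop := ∀ (data : List String) (row : Int) (col : Int), Dom_CollectLowerCaseCharacters data row col → Pre_CollectLowerCaseCharacters data row col → Spec_CollectLowerCaseCharacters data row col (CollectLowerCaseCharacters data row col)

-- ===== LEMMAS AND PROOFS =====

theorem alt_nil (data : List String) (row col : Int) (h : (data.length : Int) ≤ row) :
    CollectLowerCaseCharacters_alt data row col = [] := by
  unfold CollectLowerCaseCharacters_alt
  rw [PySem.List.pyRange_one_eq_nil h]
  rfl

theorem alt_cons (data : List String) (row col : Int) (h : row < (data.length : Int)) :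
    CollectLowerCaseCharacters_alt data row col =
      pvInner ((PySem.List.pyGet? data row).getD "") col
        ++ CollectLowerCaseCharacters_alt data (row + 1) 0 := by
  unfold CollectLowerCaseCharacters_alt
  rw [PySem.List.pyRange_one_cons h, List.flatMap_cons]
  congr 1
  · simp
  · apply List.flatMap_congr
    intro x hx
    have hx1 := (PySem.List.mem_pyRange_one.mp hx).1
    have hxr : ¬ x = row := by omega
    by_cases hx2 : x = row + 1 <;> simp [hxr, hx2]

theorem inner_nil (s : String) (start : Int) (h : PySem.Str.len s ≤ start) :
    pvInner s start = [] := by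
  unfold pvInner
  rw [PySem.List.pyRange_one_eq_nil h]
  rfl

theorem inner_step (s : String) (start : Int) (h : start < PySem.Str.len s) (ch : Char)
    (hget : PySem.Str.pyGet? s start = some ch) :
    pvInner s start =
      (if PySem.Chars.islower ch then [String.ofList [ch]] else []) ++ pvInner s (start + 1) := by
  unfold pvInner
  rw [PySem.List.pyRange_one_cons h, List.filterMap_cons]
  simp only [hget]
  by_cases hl : PySem.Chars.islower ch = true <;> simp [hl]

theorem pre_next_row (data : List String) (row : Int) (s : String)
    (hrow : PySem.List.pyGet? data row = some s) :
    Pre_CollectLowerCaseCharacters data (row + 1) 0 := by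
  by_cases h1 : (data.length : Int) ≤ row + 1
  · exact Or.inl h1
  · have hin : PySem.Raise.InRange data.length row := by
      by_contra hc
      rw [← PySem.List.pyGet?_eq_none_iff data row] at hc
      simp [hrow] at hc
    refine Or.inr ⟨?_, ?_⟩
    · rw [Option.isSome_iff_ne_none]
      intro hc
      rw [PySem.List.pyGet?_eq_none_iff data (row + 1)] at hc
      simp only [PySem.Raise.InRange] at hc hin
      omega
    · have := PySem.Str.len_eq ((PySem.List.pyGet? data (row + 1)).getD "")
      omega

theorem pre_next_col (data : List String) (row col : Int)
    (h : ¬ (data.length : Int) ≤ row)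
    (hpre : Pre_CollectLowerCaseCharacters data row col) :
    Pre_CollectLowerCaseCharacters data row (col + 1) := by
  rcases hpre with h1 | ⟨h1, h2⟩
  · exact absurd h1 h
  · exact Or.inr ⟨h1, by omega⟩

theorem main_equiv (data : List String) (row col : Int) :
    Pre_CollectLowerCaseCharacters data row col →
      CollectLowerCaseCharacters data row col = CollectLowerCaseCharacters_alt data row col := by
  induction row, col using CollectLowerCaseCharacters.induct (data := data) with
  | case1 row col h =>
    intro _
    rw [CollectLowerCaseCharacters, if_pos h, alt_nil data row col h]
  | case2 row col h hrow =>
    intro hpre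
    rcases hpre with h1 | ⟨h1, _⟩
    · exact absurd h1 h
    · simp [hrow] at h1
  | case3 row col h s hrow hcol ih =>
    intro hpre
    rw [CollectLowerCaseCharacters, if_neg h]
    split
    next heq => simp [hrow] at heq
    next s' heq =>
      rw [hrow] at heq; injection heq with heq'; subst heq'
      rw [if_pos hcol, alt_cons data row col (by omega), hrow]
      rw [ih (pre_next_row data row s hrow)]
      simp [inner_nil s col hcol]
  | case4 row col h s hrow hcol hget =>
    intro hpre
    rcases hpre with h1 | ⟨_, h2⟩
    · exact absurd h1 h
    · rw [hrow, Option.getD_some] at h2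
      have hget' : PySem.List.pyGet? s.toList col = none := by simpa using hget
      rw [PySem.List.pyGet?_eq_none_iff] at hget'
      have hlen := PySem.Str.len_eq s
      simp only [PySem.Raise.InRange] at hget'
      omega
  | case5 row col h s hrow hcol ch hget hlow ih =>
    intro hpre
    rw [CollectLowerCaseCharacters, if_neg h]
    split
    next heq => simp [hrow] at heq
    next s' heq =>
      rw [hrow] at heq; injection heq with heq'; subst heq'
      rw [if_neg hcol]
      split
      next heq2 => rw [hget] at heq2; cases heq2
      next ch' heq2 =>
        rw [hget] at heq2; injection heq2 with heq2'; subst heq2'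
        rw [if_pos hlow]
        have halt1 : CollectLowerCaseCharacters_alt data row col
            = pvInner s col ++ CollectLowerCaseCharacters_alt data (row + 1) 0 := by
          rw [alt_cons data row col (by omega), hrow]; rfl
        have halt2 : CollectLowerCaseCharacters_alt data row (col + 1)
            = pvInner s (col + 1) ++ CollectLowerCaseCharacters_alt data (row + 1) 0 := by
          rw [alt_cons data row (col + 1) (by omega), hrow]; rfl
        rw [halt1, inner_step s col (by omega) ch hget, if_pos hlow,
          ih (pre_next_col data row col h hpre), halt2]
        simp
  | case6 row col h s hrow hcol ch hget hlow ih =>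
    intro hpre
    rw [CollectLowerCaseCharacters, if_neg h]
    split
    next heq => simp [hrow] at heq
    next s' heq =>
      rw [hrow] at heq; injection heq with heq'; subst heq'
      rw [if_neg hcol]
      split
      next heq2 => rw [hget] at heq2; cases heq2
      next ch' heq2 =>
        rw [hget] at heq2; injection heq2 with heq2'; subst heq2'
        rw [if_neg hlow]
        have halt1 : CollectLowerCaseCharacters_alt data row col
            = pvInner s col ++ CollectLowerCaseCharacters_alt data (row + 1) 0 := by
          rw [alt_cons data row col (by omega), hrow]; rfl
        have halt2 : CollectLowerCaseCharacters_alt data row (col + 1)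
            = pvInner s (col + 1) ++ CollectLowerCaseCharacters_alt data (row + 1) 0 := by
          rw [alt_cons data row (col + 1) (by omega), hrow]; rfl
        rw [halt1, inner_step s col (by omega) ch hget, if_neg hlow,
          ih (pre_next_col data row col h hpre), halt2]
        simp

-- ===== VERDICT (by name: the statement is the Claim_ definition above) =====
theorem CollectLowerCaseCharacters_spec : Claim_equal_CollectLowerCaseCharacters := by
  intro data row col _ hpre
  unfold Spec_CollectLowerCaseCharacters
  exact main_equiv data row col hpre
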